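-- pv_equiv track=rewrite | github.com/aj3423/Encode_Solidity_CTF_2025 | src/permutation.py | generate_transitions
-- ===== SOURCE A (Python) =====
-- def generate_transitions(arrays):
--     transitions = {}
--
--     for arr in arrays:
--         for i in range(len(arr) - 1):
--             current = arr[i]
--             next_val = arr[i + 1]
--
--             if current not in transitions:
--                 transitions[current] = set()
--
--             transitions[current].add(next_val)
--
--     for key in transitions:
--         transitions[key] = sorted(list(transitions[key]))[:2]
--
--     return transitions
-- ===== SOURCE B (Python) =====
-- def generate_transitions(arrays):
--     # One pass: keep, per key, only its two smallest distinct successors (m1, m2),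
--     # instead of accumulating full successor sets and sorting them afterwards.
--     best = {}
--     for arr in arrays:
--         for cur, nxt in zip(arr, arr[1:]):
--             st = best.get(cur)
--             if st is None:
--                 best[cur] = (nxt, None)
--             else:
--                 m1, m2 = st
--                 if nxt < m1:
--                     best[cur] = (nxt, m1)
--                 elif nxt != m1 and (m2 is None or nxt < m2):
--                     best[cur] = (m1, nxt)
--     return {k: [m1] if m2 is None else [m1, m2] for k, (m1, m2) in best.items()}
-- ===== Notes on version B (the rewrite author's own statement) =====
-- stated objective: faster
-- what changed: Instead of accumulating a full successor set per key and sorting each set at the end, B keeps only the two smallest distinct successors per key, updated incrementally in a single pass.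
import Mathlib
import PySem

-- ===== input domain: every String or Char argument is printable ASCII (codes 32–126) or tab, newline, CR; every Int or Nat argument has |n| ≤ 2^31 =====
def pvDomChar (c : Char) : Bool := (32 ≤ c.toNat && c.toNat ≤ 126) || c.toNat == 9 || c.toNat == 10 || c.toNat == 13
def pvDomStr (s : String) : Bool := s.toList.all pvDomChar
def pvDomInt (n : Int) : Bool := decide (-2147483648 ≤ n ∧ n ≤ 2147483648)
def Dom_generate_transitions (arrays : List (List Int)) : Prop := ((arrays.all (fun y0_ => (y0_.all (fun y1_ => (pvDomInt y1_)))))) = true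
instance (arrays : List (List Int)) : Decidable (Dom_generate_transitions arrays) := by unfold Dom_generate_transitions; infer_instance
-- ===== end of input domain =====

-- B replaces A's per-key successor sets (sorted and truncated at the end) by an incremental
-- record of each key's two smallest distinct successors, maintained in one pass (objective: faster).

-- ===== PORT A =====
def generate_transitions (arrays : List (List Int)) : List (Int × List Int) :=
  let transitions : PySem.Dict Int (PySem.Set Int) :=
    arrays.foldl (fun d arr =>
      (PySem.List.pyRange 0 ((arr.length : Int) - 1) 1).foldl (fun d i =>
        let current := PySem.List.pyGetD arr i 0
        let next_val := PySem.List.pyGetD arr (i + 1) 0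
        let d := if d.contains current then d else d.insert current PySem.Set.empty
        d.insert current (PySem.Set.add (d.getD current PySem.Set.empty) next_val)) d)
      PySem.Dict.empty
  -- 'for key in transitions: transitions[key] = sorted(list(...))[:2]; return transitions':
  -- in-place reassignment keeps each key's position, so the items are mapped in order
  (transitions.items.map (fun p =>
    (p.1, PySem.List.slice (PySem.List.sorted p.2 (fun x => x) false) none (some 2))))

-- ===== PORT B =====
-- B's state update: (m1, m2) are the two smallest distinct successors seen so far (m2 optional)
def pvUpd (st : Int × Option Int) (nxt : Int) : Int × Option Int :=
  if nxt < st.1 then (nxt, some st.1)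
  else if nxt ≠ st.1 ∧ (match st.2 with | none => true | some m2 => decide (nxt < m2)) = true
    then (st.1, some nxt)
    else st

def generate_transitions_alt (arrays : List (List Int)) : List (Int × List Int) :=
  let best : PySem.Dict Int (Int × Option Int) :=
    arrays.foldl (fun d arr =>
      (arr.zip (PySem.List.slice arr (some 1) none)).foldl (fun d p =>
        match d.get? p.1 with
        | none => d.insert p.1 (p.2, none)
        | some st => d.insert p.1 (pvUpd st p.2)) d)
      PySem.Dict.empty
  best.items.map (fun p =>
    (p.1, match p.2.2 with | none => [p.2.1] | some m2 => [p.2.1, m2]))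

-- ===== PRECONDITION & SPEC =====
def Spec_generate_transitions (arrays : List (List Int)) (out : List (Int × List Int)) : Prop := out = generate_transitions_alt arrays
instance (arrays : List (List Int)) (out : List (Int × List Int)) : Decidable (Spec_generate_transitions arrays out) := by unfold Spec_generate_transitions; infer_instance

-- ===== CLAIM (what is proved, stated in full; the proofs are below) =====
def Claim_equal_generate_transitions : Prop := ∀ (arrays : List (List Int)), Dom_generate_transitions arrays → Spec_generate_transitions arrays (generate_transitions arrays)

-- ===== LEMMAS AND PROOFS =====

-- B's state as a function of A's successor set: the first two elements of the sorted set
def pvStOf (s : List Int) : Int × Option Int :=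
  match PySem.List.sorted s (fun x => x) false with
  | [] => (0, none)
  | [a] => (a, none)
  | a :: b :: _ => (a, some b)

def pvMapVals (d : PySem.Dict Int (List Int)) : PySem.Dict Int (Int × Option Int) :=
  PySem.Dict.mk (d.items.map (fun p => (p.1, pvStOf p.2)))

theorem pv_get?_mapVals (d : PySem.Dict Int (List Int)) (k : Int) :
    (pvMapVals d).get? k = (d.get? k).map pvStOf := by
  simp [pvMapVals, PySem.Dict.get?, List.find?_map, Option.map_map, Function.comp_def]

theorem pv_mapVals_insert (d : PySem.Dict Int (List Int)) (k : Int) (v : List Int) :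
    pvMapVals (d.insert k v) = (pvMapVals d).insert k (pvStOf v) := by
  have hc : (pvMapVals d).contains k = d.contains k := by
    simp [pvMapVals, PySem.Dict.contains, List.any_map, Function.comp_def]
  simp only [PySem.Dict.insert, hc]
  by_cases h : d.contains k = true
  · simp only [h, if_true, pvMapVals, List.map_map, PySem.Dict.mk.injEq]
    apply List.map_congr_left; intro p _
    by_cases hp : p.1 = k <;> simp [hp]
  · simp [h, pvMapVals]

-- appending one element to the sort input inserts it (the insertion-sort shape of sorted)
theorem pv_sorted_append (s : List Int) (n : Int) :
    PySem.List.sorted (s ++ [n]) (fun x => x) false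
      = PySem.List.insertBy (fun a b => decide (a < b)) n (PySem.List.sorted s (fun x => x) false) := by
  rw [PySem.List.sorted_eq_foldl_insertBy, PySem.List.sorted_eq_foldl_insertBy, List.foldl_append]
  rfl

-- core: adding to a nonempty nodup set updates the two-smallest record exactly as pvUpd does
theorem pv_stOf_add (s : List Int) (hnd : s.Nodup) (hne : s ≠ []) (n : Int) :
    pvStOf (PySem.Set.add s n) = pvUpd (pvStOf s) n := by
  have hperm := PySem.List.sorted_perm s (fun x => x) false
  have hpw := PySem.List.sorted_pairwise s (fun x => x)
  have hndL : (PySem.List.sorted s (fun x => x) false).Nodup := hperm.nodup_iff.mpr hnd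
  have hlt : (PySem.List.sorted s (fun x => x) false).Pairwise (· < ·) := by
    refine (hpw.and hndL).imp ?_
    rintro a b ⟨h1, h2⟩; exact lt_of_le_of_ne h1 h2
  by_cases hmem : n ∈ s
  · have hadd : PySem.Set.add s n = s := by
      simp [PySem.Set.add, PySem.Set.contains, hmem]
    rw [hadd]
    rcases hL : PySem.List.sorted s (fun x => x) false with _ | ⟨a, _ | ⟨b, t⟩⟩
    · exact absurd ((PySem.List.sorted_eq_nil_iff s _ false).mp hL) hne
    · -- singleton: s = [a], n = a
      have hs : s = [a] := List.perm_singleton.mp (hL ▸ hperm).symm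
      have hna : n = a := by simpa [hs] using hmem
      simp [pvStOf, hL, pvUpd, hna]
    · -- sorted s = a :: b :: t and n already a member: the record does not move
      have hmemL : n ∈ a :: b :: t := (hL ▸ hperm).mem_iff.mpr hmem
      rw [hL] at hlt
      obtain ⟨hA, hlt2⟩ := List.pairwise_cons.mp hlt
      obtain ⟨hB, _⟩ := List.pairwise_cons.mp hlt2
      have hab : a < b := hA b (by simp)
      by_cases hna : n = a
      · simp [pvStOf, hL, pvUpd, hna]
      · have han : a < n ∧ b ≤ n := by
          simp only [List.mem_cons] at hmemL
          rcases hmemL with h | h | h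
          · exact absurd h hna
          · exact ⟨h ▸ hab, le_of_eq h.symm⟩
          · exact ⟨hA n (by simp [h]), le_of_lt (hB n h)⟩
        have h1 : ¬ n < a := by omega
        have h2 : ¬ n < b := by omega
        simp [pvStOf, hL, pvUpd, h1, h2, hna]
  · have hadd : PySem.Set.add s n = s ++ [n] := by
      simp [PySem.Set.add, PySem.Set.contains, hmem]
    rw [hadd]
    have hins := pv_sorted_append s n
    rcases hL : PySem.List.sorted s (fun x => x) false with _ | ⟨a, _ | ⟨b, t⟩⟩
    · exact absurd ((PySem.List.sorted_eq_nil_iff s _ false).mp hL) hne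
    · rw [hL] at hins
      have hna : n ≠ a := by
        intro h; exact hmem ((hL ▸ hperm).mem_iff.mp (by simp [h]))
      by_cases hlt' : n < a
      · have : PySem.List.sorted (s ++ [n]) (fun x => x) false = [n, a] := by
          rw [hins]; simp [PySem.List.insertBy, hlt']
        simp [pvStOf, this, hL, pvUpd, hlt']
      · have : PySem.List.sorted (s ++ [n]) (fun x => x) false = [a, n] := by
          rw [hins]; simp [PySem.List.insertBy, hlt']
        simp [pvStOf, this, hL, pvUpd, hlt', hna]
    · rw [hL] at hins
      have hna : n ≠ a := by
        intro h; exact hmem ((hL ▸ hperm).mem_iff.mp (by simp [h]))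
      by_cases h1 : n < a
      · have : PySem.List.sorted (s ++ [n]) (fun x => x) false = n :: a :: b :: t := by
          rw [hins]; simp [PySem.List.insertBy, h1]
        simp [pvStOf, this, hL, pvUpd, h1]
      · by_cases h2 : n < b
        · have : PySem.List.sorted (s ++ [n]) (fun x => x) false = a :: n :: b :: t := by
            rw [hins]; simp [PySem.List.insertBy, h1, h2]
          simp [pvStOf, this, hL, pvUpd, h1, h2, hna]
        · have : PySem.List.sorted (s ++ [n]) (fun x => x) false
              = a :: b :: PySem.List.insertBy (fun a b => decide (a < b)) n t := by
            rw [hins]; simp [PySem.List.insertBy, h1, h2]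
          simp [pvStOf, this, hL, pvUpd, h1, h2]

-- the two loop bodies over one (current, next) pair
def pvStepA (d : PySem.Dict Int (PySem.Set Int)) (p : Int × Int) : PySem.Dict Int (PySem.Set Int) :=
  let d := if d.contains p.1 then d else d.insert p.1 PySem.Set.empty
  d.insert p.1 (PySem.Set.add (d.getD p.1 PySem.Set.empty) p.2)

def pvStepB (d : PySem.Dict Int (Int × Option Int)) (p : Int × Int) : PySem.Dict Int (Int × Option Int) :=
  match d.get? p.1 with
  | none => d.insert p.1 (p.2, none)
  | some st => d.insert p.1 (pvUpd st p.2)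

-- invariant on A's dict: unique keys, every successor set nonempty and duplicate-free
def pvInv (d : PySem.Dict Int (List Int)) : Prop :=
  d.keys.Nodup ∧ ∀ p ∈ d.items, p.2 ≠ [] ∧ p.2.Nodup

theorem pv_step (d : PySem.Dict Int (List Int)) (hd : pvInv d) (p : Int × Int) :
    pvStepB (pvMapVals d) p = pvMapVals (pvStepA d p) ∧ pvInv (pvStepA d p) := by
  obtain ⟨hk, hv⟩ := hd
  by_cases hc : d.contains p.1 = true
  · obtain ⟨s, hs⟩ : ∃ s, d.get? p.1 = some s := by
      rw [PySem.Dict.contains_eq_isSome_get?] at hc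
      exact Option.isSome_iff_exists.mp hc
    obtain ⟨hne, hnd⟩ := hv _ (PySem.Dict.mem_items_of_get?_eq_some d hs)
    have hstepA : pvStepA d p = d.insert p.1 (PySem.Set.add s p.2) := by
      simp [pvStepA, hc, PySem.Dict.getD, hs]
    have hstepB : pvStepB (pvMapVals d) p = (pvMapVals d).insert p.1 (pvUpd (pvStOf s) p.2) := by
      simp [pvStepB, pv_get?_mapVals, hs]
    refine ⟨?_, ?_, ?_⟩
    · rw [hstepB, hstepA, pv_mapVals_insert, pv_stOf_add s hnd hne]
    · rw [hstepA]; exact PySem.Dict.nodup_keys_insert d _ _ hk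
    · rw [hstepA]; intro q hq
      rcases (PySem.Dict.mem_items_insert d _ _ q).mp hq with h | ⟨h, _⟩
      · subst h
        constructor
        · simp only [PySem.Set.add]
          split <;> simp [hne]
        · exact PySem.Set.nodup_add s p.2 hnd
      · exact hv q h
  · have hstepA : pvStepA d p = d.insert p.1 [p.2] := by
      simp [pvStepA, hc, PySem.Dict.getD_insert_self, PySem.Dict.insert_insert_self]
    have hstepB : pvStepB (pvMapVals d) p = (pvMapVals d).insert p.1 (p.2, none) := by
      have : d.get? p.1 = none := (PySem.Dict.get?_eq_none_iff_contains d p.1).mpr (by simpa using hc)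
      simp [pvStepB, pv_get?_mapVals, this]
    refine ⟨?_, ?_, ?_⟩
    · rw [hstepB, hstepA, pv_mapVals_insert]
      rfl
    · rw [hstepA]; exact PySem.Dict.nodup_keys_insert d _ _ hk
    · rw [hstepA]; intro q hq
      rcases (PySem.Dict.mem_items_insert d _ _ q).mp hq with h | ⟨h, _⟩
      · subst h; simp
      · exact hv q h

theorem pv_fold (ps : List (Int × Int)) (d : PySem.Dict Int (List Int)) (hd : pvInv d) :
    ps.foldl pvStepB (pvMapVals d) = pvMapVals (ps.foldl pvStepA d) ∧ pvInv (ps.foldl pvStepA d) := by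
  induction ps generalizing d with
  | nil => exact ⟨rfl, hd⟩
  | cons p ps ih =>
    obtain ⟨h1, h2⟩ := pv_step d hd p
    simpa [h1] using ih (pvStepA d p) h2

-- the inner index loop of A and the zip loop of B process the same stream of adjacent pairs
theorem pv_pairs (arr : List Int) :
    (PySem.List.pyRange 0 ((arr.length : Int) - 1) 1).map
      (fun i => (PySem.List.pyGetD arr i 0, PySem.List.pyGetD arr (i + 1) 0))
    = arr.zip (PySem.List.slice arr (some 1) none) := by
  rw [PySem.List.slice_from_one]
  apply List.ext_getElem
  · simp [PySem.List.length_pyRange_one]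
  · intro k h1 h2
    simp only [List.getElem_map, PySem.List.getElem_pyRange_one, List.getElem_zip, List.getElem_tail]
    have hk : k < arr.length - 1 := by
      simpa [PySem.List.length_pyRange_one] using h1
    have e1 : (0 : Int) + (k : Int) = ((k : Nat) : Int) := by ring
    have e2 : (k : Int) + 1 = (((k + 1 : Nat)) : Int) := by push_cast; ring
    rw [e1, e2, PySem.List.pyGetD_natCast, PySem.List.pyGetD_natCast,
      List.getD_eq_getElem arr 0 (by omega), List.getD_eq_getElem arr 0 (by omega)]

theorem pv_fold_arrays (arrays : List (List Int)) (d : PySem.Dict Int (List Int)) (hd : pvInv d) :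
    arrays.foldl (fun d arr => (arr.zip (PySem.List.slice arr (some 1) none)).foldl pvStepB d) (pvMapVals d)
      = pvMapVals (arrays.foldl (fun d arr => (arr.zip (PySem.List.slice arr (some 1) none)).foldl pvStepA d) d)
    ∧ pvInv (arrays.foldl (fun d arr => (arr.zip (PySem.List.slice arr (some 1) none)).foldl pvStepA d) d) := by
  induction arrays generalizing d with
  | nil => exact ⟨rfl, hd⟩
  | cons arr arrays ih =>
    obtain ⟨h1, h2⟩ := pv_fold (arr.zip (PySem.List.slice arr (some 1) none)) d hd
    simpa [h1] using ih _ h2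

-- the final per-value rendering: sorted[:2] of the set is exactly B's one-or-two-element list
theorem pv_render (s : List Int) (hne : s ≠ []) :
    PySem.List.slice (PySem.List.sorted s (fun x => x) false) none (some 2)
    = (match (pvStOf s).2 with | none => [(pvStOf s).1] | some m2 => [(pvStOf s).1, m2]) := by
  rw [PySem.List.slice_to _ (by norm_num)]
  rcases hL : PySem.List.sorted s (fun x => x) false with _ | ⟨a, _ | ⟨b, t⟩⟩
  · exact absurd ((PySem.List.sorted_eq_nil_iff s _ false).mp hL) hne
  · simp [pvStOf, hL]
  · simp [pvStOf, hL]

-- ===== VERDICT (by name: the statement is the Claim_ definition above) =====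
theorem generate_transitions_spec : Claim_equal_generate_transitions := by
  unfold Claim_equal_generate_transitions
  intro arrays _
  unfold Spec_generate_transitions generate_transitions generate_transitions_alt
  have hAin : ∀ (d : PySem.Dict Int (PySem.Set Int)) (arr : List Int),
      (PySem.List.pyRange 0 ((arr.length : Int) - 1) 1).foldl (fun d i =>
        let current := PySem.List.pyGetD arr i 0
        let next_val := PySem.List.pyGetD arr (i + 1) 0
        let d := if d.contains current then d else d.insert current PySem.Set.empty
        d.insert current (PySem.Set.add (d.getD current PySem.Set.empty) next_val)) d
      = (arr.zip (PySem.List.slice arr (some 1) none)).foldl pvStepA d := by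
    intro d arr
    rw [← pv_pairs, List.foldl_map]
    rfl
  have hBin : ∀ (d : PySem.Dict Int (Int × Option Int)) (arr : List Int),
      (arr.zip (PySem.List.slice arr (some 1) none)).foldl (fun d p =>
        match d.get? p.1 with
        | none => d.insert p.1 (p.2, none)
        | some st => d.insert p.1 (pvUpd st p.2)) d
      = (arr.zip (PySem.List.slice arr (some 1) none)).foldl pvStepB d := fun _ _ => rfl
  simp only [hAin, hBin]
  have hInv0 : pvInv PySem.Dict.empty := ⟨by simp [PySem.Dict.empty, PySem.Dict.keys], by simp [PySem.Dict.empty]⟩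
  obtain ⟨heq, hinv⟩ := pv_fold_arrays arrays PySem.Dict.empty hInv0
  have h0 : pvMapVals PySem.Dict.empty = PySem.Dict.empty := rfl
  rw [h0] at heq
  rw [heq]
  simp only [pvMapVals, List.map_map]
  apply List.map_congr_left
  intro p hp
  have hne := (hinv.2 p hp).1
  simp [pv_render p.2 hne]
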